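-- pv_equiv track=rewrite | github.com/kazooiebombchu/movelister | pythonpath/movelister/masterList.py | processVariations
-- ===== SOURCE A (Python) =====
-- import itertools
--
-- def processVariations(currentActionMods, antiVariationSet):
--
--     # Get a set of all possible variations of a single action.
--     variationSet = getPossibleVariations(currentActionMods)
--     filteredSet = variationSet.copy()
--
--     # Delete impossible combinations from the set based on modifier rules.
--     for imp in antiVariationSet:
--         for item in variationSet:
--             if match(item, imp):
--                 filteredSet.discard(item)
--
--     # Delete empty from the set.
--     emptySet = {()}
--     refinedSet = filteredSet - emptySet
--
--     # Sort the data.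
--     sortedList = sorted(refinedSet)
--     return sortedList
--
-- def getPossibleVariations(currentActionMods):
--     z = -1
--     tempMods1 = []
--     tempMods2 = []
--
--     # The loop unpacks all values from currentActionMods to tempMods2.
--     # Then calculates and appends all combinations of those values to tempMods1.
--     while z < len(currentActionMods) - 1:
--         tempMods2.clear()
--         z = z + 1
--         xyz = -1
--         while xyz < len(currentActionMods[z]) - 1:
--             xyz = xyz + 1
--             tempMods2.append(currentActionMods[z][xyz])
--             if len(tempMods2) > 0:
--                 for L in range(0, len(tempMods2) + 1):
--                     for subset in itertools.combinations(tempMods2, L):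
--                         tempMods1.append(subset)
--
--     # Converts tempMods1 into a set to delete all duplicates.
--     tempSet = set(tempMods1)
--     return tempSet
--
-- def match(combination, match):
--     return all(elem in combination for elem in match)
-- ===== SOURCE B (Python) =====
-- import itertools
--
-- def processVariations(currentActionMods, antiVariationSet):
--     # Single comprehension builds the variation set; one-pass filter replaces
--     # the copy/double-loop discard and the empty-tuple subtraction.
--     variationSet = {combo
--                     for action in currentActionMods
--                     for L in range(len(action) + 1)
--                     for combo in itertools.combinations(action, L)}
--     return sorted(item for item in variationSet
--                   if item and not any(all(e in item for e in imp)
--                                       for imp in antiVariationSet))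
-- ===== Notes on version B (the rewrite author's own statement) =====
-- stated objective: simpler
-- what changed: B builds the variation set directly as one comprehension over each full action's combinations (dropping A's per-prefix recomputation of all combinations) and replaces A's copy/double-loop discard plus empty-tuple set subtraction by a single-pass filter predicate (non-empty and matching no anti-variation) before sorting.
import Mathlib
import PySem

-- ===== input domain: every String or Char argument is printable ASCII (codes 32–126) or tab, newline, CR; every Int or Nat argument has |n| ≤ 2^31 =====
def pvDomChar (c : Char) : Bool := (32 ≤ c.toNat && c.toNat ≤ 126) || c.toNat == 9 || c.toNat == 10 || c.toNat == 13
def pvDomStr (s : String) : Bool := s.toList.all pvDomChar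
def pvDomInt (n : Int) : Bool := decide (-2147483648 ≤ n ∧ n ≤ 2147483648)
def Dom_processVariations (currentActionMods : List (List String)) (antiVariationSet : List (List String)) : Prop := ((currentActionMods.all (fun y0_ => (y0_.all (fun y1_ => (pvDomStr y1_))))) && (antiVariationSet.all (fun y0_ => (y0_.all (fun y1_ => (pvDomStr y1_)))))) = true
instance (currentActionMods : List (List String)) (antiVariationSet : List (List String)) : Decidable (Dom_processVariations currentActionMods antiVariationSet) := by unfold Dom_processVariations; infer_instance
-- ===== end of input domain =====

-- B replaces A's incremental-prefix recomputation and build-then-discard loops by one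
-- comprehension over each full action's combinations and a single-pass filter (simpler).


-- ===== PORT A =====
-- helper `match(combination, match)` of the Python module ('match' is reserved in Lean)
def pvMatch (combination : List String) (imp : List String) : Bool :=
  imp.all (fun elem => combination.contains elem)

-- body of the inner `while xyz < len(...)` loop: state = (tempMods2, tempMods1);
-- itertools.combinations is PySem.List.combinations
def pvStepA (st : List String × List (List String)) (m : String) :
    List String × List (List String) :=
  let tempMods2 := st.1 ++ [m]
  let tempMods1 :=
    if tempMods2.length > 0 then
      (List.range (tempMods2.length + 1)).foldl
        (fun acc L => acc ++ PySem.List.combinations tempMods2 L) st.2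
    else st.2
  (tempMods2, tempMods1)

def getPossibleVariations (currentActionMods : List (List String)) : PySem.Set (List String) :=
  -- the two index-driven while loops traverse the lists in order: folds over the same state
  let tempMods1 : List (List String) :=
    currentActionMods.foldl
      (fun tempMods1 action => (action.foldl pvStepA ([], tempMods1)).2) []
  PySem.Set.ofList tempMods1

def processVariations (currentActionMods : List (List String)) (antiVariationSet : List (List String)) : List (List String) :=
  let variationSet := getPossibleVariations currentActionMods
  let filteredSet := antiVariationSet.foldl
    (fun filteredSet imp =>
      variationSet.foldl
        (fun fs item => if pvMatch item imp then PySem.Set.discard fs item else fs)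
        filteredSet)
    variationSet
  let refinedSet := PySem.Set.diff filteredSet (PySem.Set.ofList [([] : List String)])
  PySem.List.sorted refinedSet (fun x => x) false

-- ===== PORT B =====
def processVariations_alt (currentActionMods : List (List String)) (antiVariationSet : List (List String)) : List (List String) :=
  let variationSet : PySem.Set (List String) := PySem.Set.ofList
    (currentActionMods.flatMap (fun action =>
      (List.range (action.length + 1)).flatMap
        (fun L => PySem.List.combinations action L)))
  PySem.List.sorted
    (List.filter (fun item =>
        !item.isEmpty &&
        !antiVariationSet.any (fun imp => imp.all (fun e => item.contains e)))
      variationSet)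
    (fun x => x) false

-- ===== PRECONDITION & SPEC =====
def Spec_processVariations (currentActionMods : List (List String)) (antiVariationSet : List (List String)) (out : List (List String)) : Prop := out = processVariations_alt currentActionMods antiVariationSet
instance (currentActionMods : List (List String)) (antiVariationSet : List (List String)) (out : List (List String)) : Decidable (Spec_processVariations currentActionMods antiVariationSet out) := by unfold Spec_processVariations; infer_instance

-- ===== CLAIM (what is proved, stated in full; the proofs are below) =====
def Claim_equal_processVariations : Prop := ∀ (currentActionMods : List (List String)) (antiVariationSet : List (List String)), Dom_processVariations currentActionMods antiVariationSet → Spec_processVariations currentActionMods antiVariationSet (processVariations currentActionMods antiVariationSet)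

-- ===== LEMMAS AND PROOFS =====

-- membership in all combinations of p of every length 0..|p| is being a sublist of p
lemma mem_allCombos (p x : List String) :
    (∃ L ∈ List.range (p.length + 1), x ∈ PySem.List.combinations p L) ↔ x.Sublist p := by
  constructor
  · rintro ⟨L, _, hc⟩
    exact ((PySem.List.mem_combinations_iff p L x).1 hc).1
  · intro hs
    exact ⟨x.length, by simp [hs.length_le],
      (PySem.List.mem_combinations_iff p x.length x).2 ⟨hs, rfl⟩⟩

-- the inner while loop of getPossibleVariations collects exactly the sublists of the action
lemma mem_foldA_snd (action : List String) (pre : List String) (acc : List (List String))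
    (x : List String) :
    x ∈ (action.foldl pvStepA (pre, acc)).2 ↔
      x ∈ acc ∨ (action ≠ [] ∧ x.Sublist (pre ++ action)) := by
  induction action generalizing pre acc with
  | nil => simp
  | cons m rest ih =>
    have hstep : pvStepA (pre, acc) m =
        (pre ++ [m], acc ++ (List.range ((pre ++ [m]).length + 1)).flatMap
          (fun L => PySem.List.combinations (pre ++ [m]) L)) := by
      simp only [pvStepA]
      rw [if_pos (by simp : (pre ++ [m]).length > 0), PySem.List.foldl_append_eq_flatMap]
    rw [List.foldl_cons, hstep, ih]
    simp only [List.mem_append, List.mem_flatMap]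
    have hall := mem_allCombos (pre ++ [m]) x
    constructor
    · rintro (⟨hx | hx⟩ | ⟨-, hx⟩)
      · exact Or.inl hx
      · refine Or.inr ⟨by simp, ?_⟩
        have h1 : x.Sublist (pre ++ [m]) := hall.1 hx
        have h2 : x.Sublist ((pre ++ [m]) ++ rest) := h1.trans (List.sublist_append_left _ _)
        simpa using h2
      · refine Or.inr ⟨by simp, ?_⟩
        simpa using hx
    · rintro (hx | ⟨-, hx⟩)
      · exact Or.inl (Or.inl hx)
      · by_cases hrest : rest = []
        · subst hrest
          refine Or.inl (Or.inr (hall.2 ?_))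
          simpa using hx
        · exact Or.inr ⟨hrest, by simpa using hx⟩

-- the outer loop: tempMods1 holds exactly the sublists of the (nonempty) actions
lemma mem_tempMods1 (cams : List (List String)) (acc : List (List String)) (x : List String) :
    x ∈ cams.foldl (fun t1 action => (action.foldl pvStepA ([], t1)).2) acc ↔
      x ∈ acc ∨ ∃ a ∈ cams, a ≠ [] ∧ x.Sublist a := by
  induction cams generalizing acc with
  | nil => simp
  | cons a cams ih =>
    rw [List.foldl_cons, ih, mem_foldA_snd]
    simp only [List.nil_append, List.mem_cons]
    constructor
    · rintro (⟨hx | hx⟩ | ⟨b, hb, hbne, hbs⟩)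
      · exact Or.inl hx
      · exact Or.inr ⟨a, Or.inl rfl, hx⟩
      · exact Or.inr ⟨b, Or.inr hb, hbne, hbs⟩
    · rintro (hx | ⟨b, hb | hb, hbne, hbs⟩)
      · exact Or.inl (Or.inl hx)
      · exact Or.inl (Or.inr ⟨by simpa [hb] using hbne, by simpa [hb] using hbs⟩)
      · exact Or.inr ⟨b, hb, hbne, hbs⟩

lemma mem_discard (s : List (List String)) (v x : List String) :
    x ∈ PySem.Set.discard s v ↔ x ∈ s ∧ x ≠ v := by
  simp [PySem.Set.discard, List.mem_filter]

-- one pass of the anti-variation discard loop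
lemma mem_discardFold (vs : List (List String)) (imp : List String)
    (fs : List (List String)) (x : List String) :
    x ∈ vs.foldl
        (fun fs item => if pvMatch item imp then PySem.Set.discard fs item else fs) fs ↔
      x ∈ fs ∧ (pvMatch x imp → x ∉ vs) := by
  induction vs generalizing fs with
  | nil => simp
  | cons v vs ih =>
    rw [List.foldl_cons, ih]
    by_cases hm : pvMatch v imp
    · simp only [hm, if_pos, mem_discard, List.mem_cons]
      by_cases hx : x = v
      · subst hx; simp [hm]
      · simp [hx]
    · simp only [hm, List.mem_cons]
      constructor
      · rintro ⟨hfs, hv⟩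
        refine ⟨hfs, fun hmx => ?_⟩
        rintro (rfl | hmem)
        · exact hm hmx
        · exact hv hmx hmem
      · rintro ⟨hfs, hv⟩
        exact ⟨hfs, fun hmx hmem => hv hmx (Or.inr hmem)⟩

lemma nodup_discardFold (vs : List (List String)) (imp : List String)
    (fs : List (List String)) (h : fs.Nodup) :
    (vs.foldl
        (fun fs item => if pvMatch item imp then PySem.Set.discard fs item else fs) fs).Nodup := by
  induction vs generalizing fs with
  | nil => exact h
  | cons v vs ih =>
    rw [List.foldl_cons]
    split
    · exact ih _ (h.filter _)
    · exact ih _ h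

-- the full discard phase: filteredSet = variationSet minus everything matching some imp
lemma mem_filteredFold (avs : List (List String)) (vs fs : List (List String)) (x : List String)
    (hsub : ∀ y, y ∈ fs → y ∈ vs) :
    x ∈ avs.foldl
        (fun filteredSet imp =>
          vs.foldl
            (fun fs item => if pvMatch item imp then PySem.Set.discard fs item else fs)
            filteredSet) fs ↔
      x ∈ fs ∧ ∀ imp ∈ avs, ¬ pvMatch x imp = true := by
  induction avs generalizing fs with
  | nil => simp
  | cons imp avs ih =>
    rw [List.foldl_cons, ih]
    · rw [mem_discardFold]
      constructor
      · rintro ⟨⟨hfs, hni⟩, hall⟩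
        refine ⟨hfs, ?_⟩
        intro imp' himp'
        rw [List.mem_cons] at himp'
        rcases himp' with rfl | himp'
        · intro hmx; exact hni hmx (hsub x hfs)
        · exact hall imp' himp'
      · rintro ⟨hfs, hall⟩
        exact ⟨⟨hfs, fun hmx _ => hall imp (by simp) hmx⟩,
          fun imp' himp' => hall imp' (by simp [himp'])⟩
    · intro y hy
      exact hsub y ((mem_discardFold vs imp fs y).1 hy).1

lemma nodup_filteredFold (avs : List (List String)) (vs fs : List (List String))
    (h : fs.Nodup) :
    (avs.foldl
        (fun filteredSet imp =>
          vs.foldl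
            (fun fs item => if pvMatch item imp then PySem.Set.discard fs item else fs)
            filteredSet) fs).Nodup := by
  induction avs generalizing fs with
  | nil => exact h
  | cons imp avs ih => exact ih _ (nodup_discardFold vs imp fs h)

-- membership in B's variation set
lemma mem_setB (cams : List (List String)) (x : List String) :
    x ∈ PySem.Set.ofList
        (cams.flatMap (fun action =>
          (List.range (action.length + 1)).flatMap
            (fun L => PySem.List.combinations action L))) ↔
      ∃ a ∈ cams, x.Sublist a := by
  rw [PySem.Set.mem_ofList]
  simp only [List.mem_flatMap]
  constructor
  · rintro ⟨a, ha, L, hL, hc⟩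
    exact ⟨a, ha, (mem_allCombos a x).1 ⟨L, hL, hc⟩⟩
  · rintro ⟨a, ha, hs⟩
    obtain ⟨L, hL, hc⟩ := (mem_allCombos a x).2 hs
    exact ⟨a, ha, L, hL, hc⟩

-- two nodup lists with the same members sort to the same list
lemma sorted_eq_of_mem_iff (LA LB : List (List String)) (hA : LA.Nodup) (hB : LB.Nodup)
    (h : ∀ x, x ∈ LA ↔ x ∈ LB) :
    PySem.List.sorted LA (fun x => x) false = PySem.List.sorted LB (fun x => x) false := by
  have hperm : LA.Perm LB := (List.perm_ext_iff_of_nodup hA hB).2 h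
  have h2 := (PySem.List.sorted_id_eq_sorted_id_iff_perm LA LB).2 hperm
  -- the ports' sorted call carries core's List LT/DecidableLT instances; `convert`
  -- identifies them with the LinearOrder ones the PySem spec lemma is stated with
  convert h2 using 2

-- ===== VERDICT (by name: the statement is the Claim_ definition above) =====
theorem processVariations_spec : Claim_equal_processVariations := by
  intro cams avs _
  show processVariations cams avs = processVariations_alt cams avs
  simp only [processVariations, processVariations_alt, getPossibleVariations]
  set vs : List (List String) := PySem.Set.ofList
    (cams.foldl (fun t1 action => (action.foldl pvStepA ([], t1)).2) []) with hvs
  set LA := PySem.Set.diff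
    (avs.foldl
      (fun filteredSet imp =>
        vs.foldl
          (fun fs item => if pvMatch item imp then PySem.Set.discard fs item else fs)
          filteredSet)
      vs)
    (PySem.Set.ofList [([] : List String)]) with hLA
  set LB := List.filter (fun item =>
      !item.isEmpty &&
      !avs.any (fun imp => imp.all (fun e => item.contains e)))
    (PySem.Set.ofList
      (cams.flatMap (fun action =>
        (List.range (action.length + 1)).flatMap
          (fun L => PySem.List.combinations action L)))) with hLB
  have hmemvs : ∀ x, x ∈ vs ↔ ∃ a ∈ cams, a ≠ [] ∧ x.Sublist a := by
    intro x
    rw [hvs, PySem.Set.mem_ofList, mem_tempMods1]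
    simp
  have hnodA : LA.Nodup := by
    rw [hLA]
    exact (nodup_filteredFold avs vs vs (PySem.Set.nodup_ofList _)).filter _
  have hnodB : LB.Nodup := by
    rw [hLB]
    exact (PySem.Set.nodup_ofList _).filter _
  have hmemA : ∀ x, x ∈ LA ↔
      ((∃ a ∈ cams, x.Sublist a) ∧ x ≠ [] ∧ ∀ imp ∈ avs, ¬ pvMatch x imp = true) := by
    intro x
    rw [hLA]
    simp only [PySem.Set.diff, List.mem_filter]
    rw [mem_filteredFold avs vs vs x (fun y hy => hy)]
    rw [hmemvs]
    constructor
    · rintro ⟨⟨⟨a, ha, _, hs⟩, hall⟩, hne⟩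
      have hne' : x ≠ [] := by
        simpa [PySem.Set.ofList, PySem.Set.add, PySem.Set.empty] using hne
      exact ⟨⟨a, ha, hs⟩, hne', hall⟩
    · rintro ⟨⟨a, ha, hs⟩, hne, hall⟩
      have hane : a ≠ [] := by
        rintro rfl
        exact hne (List.sublist_nil.1 hs)
      refine ⟨⟨⟨a, ha, hane, hs⟩, hall⟩, ?_⟩
      simpa [PySem.Set.ofList, PySem.Set.add, PySem.Set.empty] using hne
  have hmemB : ∀ x, x ∈ LB ↔
      ((∃ a ∈ cams, x.Sublist a) ∧ x ≠ [] ∧ ∀ imp ∈ avs, ¬ pvMatch x imp = true) := by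
    intro x
    rw [hLB]
    simp only [List.mem_filter, mem_setB, Bool.and_eq_true, Bool.not_eq_true',
      List.any_eq_false, List.isEmpty_eq_false_iff]
    unfold pvMatch
    tauto
  exact sorted_eq_of_mem_iff LA LB hnodA hnodB
    (fun x => (hmemA x).trans (hmemB x).symm)
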